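-- pv_equiv track=rewrite | github.com/valvarl/flowkit-async | src/flowkit/graph/compiler.py | _invert_parents
-- ===== SOURCE A (Python) =====
-- def _invert_parents(parents_by_child: dict[str, list[str]]) -> dict[str, list[str]]:
--     out: dict[str, list[str]] = {}
--     for child, parents in parents_by_child.items():
--         for p in parents:
--             out.setdefault(p, []).append(child)
--     for k, v in out.items():
--         out[k] = sorted(list(dict.fromkeys(v)))
--     return out
-- ===== SOURCE B (Python) =====
-- def _invert_parents(parents_by_child: dict[str, list[str]]) -> dict[str, list[str]]:
--     # Gather instead of scatter: record each parent in first-appearance order,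
--     # then compute every parent's children by one scan of the mapping per parent.
--     parents: list[str] = []
--     for ps in parents_by_child.values():
--         for p in ps:
--             if p not in parents:
--                 parents.append(p)
--     return {p: sorted({c for c, ps in parents_by_child.items() if p in ps})
--             for p in parents}
-- ===== Notes on version B (the rewrite author's own statement) =====
-- stated objective: alternative
-- what changed: A scatters every edge into a dict of child-lists and then dedups+sorts each list in a second pass; B never builds that intermediate dict: it collects the parents in first-appearance order and computes each parent's children directly with a gather scan and a set comprehension.
import Mathlib
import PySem

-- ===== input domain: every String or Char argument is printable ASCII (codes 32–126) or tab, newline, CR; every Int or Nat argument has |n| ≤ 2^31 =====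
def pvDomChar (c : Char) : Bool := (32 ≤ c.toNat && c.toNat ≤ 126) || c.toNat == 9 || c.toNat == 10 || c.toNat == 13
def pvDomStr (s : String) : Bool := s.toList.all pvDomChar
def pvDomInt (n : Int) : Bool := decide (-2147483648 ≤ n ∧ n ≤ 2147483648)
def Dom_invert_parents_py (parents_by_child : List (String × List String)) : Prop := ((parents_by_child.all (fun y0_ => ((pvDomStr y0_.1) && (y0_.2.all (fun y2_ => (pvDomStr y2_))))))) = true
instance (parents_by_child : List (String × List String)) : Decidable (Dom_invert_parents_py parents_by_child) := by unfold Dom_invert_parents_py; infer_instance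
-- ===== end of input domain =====

-- B replaces A's scatter-into-dict-then-sort-each-list with a gather strategy: parents in
-- first-appearance order, then each parent's children computed by a direct scan (alternative, not faster).


-- ===== PORT A =====
def invert_parents_py (parents_by_child : List (String × List String)) : List (String × List String) :=
  -- out.setdefault(p, []).append(child)  ==  out[p] = out.get(p, []) + [child]  ==  Dict.modify
  let out : PySem.Dict String (List String) :=
    parents_by_child.foldl
      (fun out cp => cp.2.foldl (fun out p => out.modify p [] (fun v => v ++ [cp.1])) out)
      PySem.Dict.empty
  -- for k, v in out.items(): out[k] = sorted(list(dict.fromkeys(v)))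
  let out2 : PySem.Dict String (List String) :=
    out.items.foldl
      (fun d kv => d.insert kv.1 (PySem.List.sorted (PySem.List.dedup kv.2) (fun x => x) false))
      out
  out2.items

-- ===== PORT B =====
def invert_parents_py_alt (parents_by_child : List (String × List String)) : List (String × List String) :=
  -- parents in first-appearance order ('if p not in parents: parents.append(p)' = Set.add)
  let parents : PySem.Set String :=
    parents_by_child.foldl
      (fun acc cp => cp.2.foldl (fun acc p => PySem.Set.add acc p) acc)
      PySem.Set.empty
  -- {p: sorted({c for c, ps in parents_by_child.items() if p in ps}) for p in parents}
  parents.map (fun p =>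
    (p, PySem.List.sorted
          (PySem.Set.ofList ((parents_by_child.filter (fun cp => cp.2.contains p)).map (fun cp => cp.1)))
          (fun x => x) false))

-- ===== PRECONDITION & SPEC =====
def Spec_invert_parents_py (parents_by_child : List (String × List String)) (out : List (String × List String)) : Prop := out = invert_parents_py_alt parents_by_child
instance (parents_by_child : List (String × List String)) (out : List (String × List String)) : Decidable (Spec_invert_parents_py parents_by_child out) := by unfold Spec_invert_parents_py; infer_instance

-- ===== CLAIM (what is proved, stated in full; the proofs are below) =====
def Claim_equal_invert_parents_py : Prop := ∀ (parents_by_child : List (String × List String)), Dom_invert_parents_py parents_by_child → Spec_invert_parents_py parents_by_child (invert_parents_py parents_by_child)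

-- ===== LEMMAS AND PROOFS =====

-- folding over a flatMap = nested folds
theorem pv_foldl_flatMap {α β γ : Type} (l : List α) (f : α → List β) (g : γ → β → γ) (init : γ) :
    (l.flatMap f).foldl g init = l.foldl (fun acc x => (f x).foldl g acc) init := by
  induction l generalizing init with
  | nil => rfl
  | cons a t ih => simp [List.flatMap_cons, List.foldl_append, ih]

-- the flattened edge list (parent, child) in A's traversal order
def pvEdges (pbc : List (String × List String)) : List (String × String) :=
  pbc.flatMap (fun cp => cp.2.map (fun p => (p, cp.1)))

theorem pv_scatter_eq_edges_foldl (pbc : List (String × List String)) :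
    pbc.foldl
      (fun out cp => cp.2.foldl (fun out p => out.modify p [] (fun v => v ++ [cp.1])) out)
      (PySem.Dict.empty : PySem.Dict String (List String))
    = (pvEdges pbc).foldl (fun d e => d.modify e.1 [] (fun v => v ++ [e.2])) PySem.Dict.empty := by
  rw [pvEdges, pv_foldl_flatMap]
  simp [List.foldl_map]

theorem pv_edges_map_fst (pbc : List (String × List String)) :
    (pvEdges pbc).map Prod.fst = pbc.flatMap (fun cp => cp.2) := by
  simp [pvEdges, List.map_flatMap, Function.comp_def]

-- overwrite loop: keys not touched keep their value
theorem pv_overwrite_getD_not_mem (g : String × List String → List String) :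
    ∀ (l : List (String × List String)) (d : PySem.Dict String (List String)) (k : String),
      k ∉ l.map Prod.fst →
      (l.foldl (fun d kv => d.insert kv.1 (g kv)) d).getD k [] = d.getD k [] := by
  intro l
  induction l with
  | nil => intro d k _; rfl
  | cons a t ih =>
    intro d k hk
    simp only [List.map_cons, List.mem_cons, not_or] at hk
    simp only [List.foldl_cons]
    rw [ih _ _ hk.2, PySem.Dict.getD_insert]
    simp [hk.1]

-- overwrite loop: a touched key gets its new value
theorem pv_overwrite_getD (g : String × List String → List String) :
    ∀ (l : List (String × List String)) (d : PySem.Dict String (List String)) (k : String) (v : List String),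
      (l.map Prod.fst).Nodup → (k, v) ∈ l →
      (l.foldl (fun d kv => d.insert kv.1 (g kv)) d).getD k [] = g (k, v) := by
  intro l
  induction l with
  | nil => intro d k v _ h; cases h
  | cons a t ih =>
    intro d k v hnd hm
    simp only [List.map_cons, List.nodup_cons] at hnd
    rcases List.mem_cons.mp hm with h | h
    · subst h
      simp only [List.foldl_cons]
      rw [pv_overwrite_getD_not_mem _ _ _ _ hnd.1, PySem.Dict.getD_insert_self]
    · exact ih _ _ _ hnd.2 h

-- Set.update with elements already present is the identity
theorem pv_set_update_self_of_subset :
    ∀ (xs : List String) (s : PySem.Set String), (∀ x ∈ xs, x ∈ s) → PySem.Set.update s xs = s := by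
  intro xs
  induction xs with
  | nil => intro s _; rfl
  | cons a t ih =>
    intro s hs
    have ha : PySem.Set.add s a = s := by
      simp [PySem.Set.add, PySem.Set.contains, hs a (by simp)]
    calc PySem.Set.update s (a :: t) = PySem.Set.update (PySem.Set.add s a) t := rfl
      _ = PySem.Set.update s t := by rw [ha]
      _ = s := ih s (fun x hx => hs x (by simp [hx]))

-- per-key value agreement between the two strategies
theorem pv_perkey (pbc : List (String × List String)) (k : String) :
    PySem.List.sorted (PySem.List.dedup (((pvEdges pbc).filter (fun e => e.1 == k)).map (fun e => e.2))) (fun x => x) false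
    = PySem.List.sorted (PySem.Set.ofList ((pbc.filter (fun cp => cp.2.contains k)).map (fun cp => cp.1))) (fun x => x) false := by
  rw [PySem.List.dedup_eq_ofList]
  apply PySem.List.sorted_eq_sorted_of_perm _ _ _ (fun a b h => h)
  rw [List.perm_ext_iff_of_nodup (PySem.Set.nodup_ofList _) (PySem.Set.nodup_ofList _)]
  intro c
  simp only [PySem.Set.mem_ofList, List.mem_map, List.mem_filter, pvEdges, List.mem_flatMap]
  constructor
  · rintro ⟨e, ⟨⟨cp, hcp, p, hp, rfl⟩, hk⟩, hc⟩
    simp only [beq_iff_eq] at hk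
    subst hk; subst hc
    exact ⟨cp, ⟨hcp, by simpa using hp⟩, rfl⟩
  · rintro ⟨cp, ⟨hcp, hk⟩, hc⟩
    exact ⟨(k, cp.1), ⟨⟨cp, hcp, k, by simpa using hk, rfl⟩, by simp⟩, hc⟩

-- ===== VERDICT (by name: the statement is the Claim_ definition above) =====
theorem invert_parents_py_spec : Claim_equal_invert_parents_py := by
  intro pbc _
  unfold Spec_invert_parents_py invert_parents_py invert_parents_py_alt
  -- name A's two dicts
  rw [pv_scatter_eq_edges_foldl]
  set out : PySem.Dict String (List String) :=
    (pvEdges pbc).foldl (fun d e => d.modify e.1 [] (fun v => v ++ [e.2])) PySem.Dict.empty with hout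
  set g : String × List String → List String :=
    fun kv => PySem.List.sorted (PySem.List.dedup kv.2) (fun x => x) false with hg
  -- facts about out
  have hkeys : out.keys = PySem.Set.ofList (pbc.flatMap (fun cp => cp.2)) := by
    rw [hout, PySem.Dict.keys_foldl_modify_key]
    rw [pv_edges_map_fst]
    simp [PySem.Set.update_nil_left, PySem.Dict.keys_empty]
  have hnd : out.keys.Nodup := by
    rw [hkeys]; exact PySem.Set.nodup_ofList _
  have hget : ∀ k, out.getD k [] = ((pvEdges pbc).filter (fun e => e.1 == k)).map (fun e => e.2) := by
    intro k
    rw [hout, PySem.Dict.getD_foldl_modify_append]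
    simp [PySem.Dict.getD_empty]
  -- the rewrite loop over out.items
  set out2 : PySem.Dict String (List String) :=
    out.items.foldl (fun d kv => d.insert kv.1 (g kv)) out with hout2
  have hkeys2 : out2.keys = out.keys := by
    rw [hout2, PySem.Dict.keys_foldl_insert_key]
    have : out.items.map Prod.fst = out.keys := rfl
    rw [this]
    exact pv_set_update_self_of_subset _ _ (fun x hx => hx)
  have hnd2 : out2.keys.Nodup := hkeys2 ▸ hnd
  have hitems2 : out2.items = out.keys.map (fun k => (k, g (k, out.getD k []))) := by
    rw [PySem.Dict.items_eq_map_keys out2 hnd2 [], hkeys2]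
    apply List.map_congr_left
    intro k hk
    have hmem : (k, out.getD k []) ∈ out.items := by
      rw [PySem.Dict.items_eq_map_keys out hnd []]
      exact List.mem_map.mpr ⟨k, hk, rfl⟩
    have : out.items.map Prod.fst = out.keys := rfl
    rw [hout2, pv_overwrite_getD g out.items out k _ (this ▸ hnd) hmem]
  -- B's parents list is out.keys
  have hparents :
      pbc.foldl (fun acc cp => cp.2.foldl (fun acc p => PySem.Set.add acc p) acc)
        (PySem.Set.empty : PySem.Set String)
      = PySem.Set.ofList (pbc.flatMap (fun cp => cp.2)) := by
    rw [PySem.Set.ofList_eq_foldl, pv_foldl_flatMap]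
    rfl
  rw [hitems2, hparents, ← hkeys]
  apply List.map_congr_left
  intro k _
  rw [hg]
  dsimp only
  rw [hget k, pv_perkey]
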